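-- pv_equiv track=rewrite | github.com/petrroll/illdashboard | backend/src/illdashboard/services/pipeline.py | _missing_page_ranges
-- ===== SOURCE A (Python) =====
-- def _covered_pages(page_count: int, ranges: list[tuple[int, int]]) -> set[int]:
--     covered: set[int] = set()
--     upper_bound = max(page_count, max((stop_page for _, stop_page in ranges), default=0))
--     for start_page, stop_page in ranges:
--         for page in range(max(0, start_page), min(stop_page, upper_bound)):
--             covered.add(page)
--     return covered
--
-- def _missing_page_ranges(page_count: int, ranges: list[tuple[int, int]], batch_size: int) -> list[tuple[int, int]]:
--     covered = _covered_pages(page_count, ranges)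
--     ranges_to_enqueue: list[tuple[int, int]] = []
--     page = 0
--     while page < page_count:
--         if page in covered:
--             page += 1
--             continue
--         start_page = page
--         stop_page = min(page_count, start_page + batch_size)
--         while stop_page > start_page and any(candidate in covered for candidate in range(start_page, stop_page)):
--             stop_page -= 1
--         if stop_page == start_page:
--             stop_page = start_page + 1
--         ranges_to_enqueue.append((start_page, stop_page))
--         page = stop_page
--     return ranges_to_enqueue
-- ===== SOURCE B (Python) =====
-- def _missing_page_ranges(page_count: int, ranges: list[tuple[int, int]], batch_size: int) -> list[tuple[int, int]]:
--     covered = {p for a, b in ranges for p in range(max(0, a), min(b, page_count))}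
--     step = max(batch_size, 1)
--     out: list[tuple[int, int]] = []
--     i = 0
--     while i < page_count:
--         if i in covered:
--             i += 1
--             continue
--         j = i
--         while j < page_count and j not in covered:
--             j += 1
--         while i < j:
--             e = min(j, i + step)
--             out.append((i, e))
--             i = e
--     return out
-- ===== Notes on version B (the rewrite author's own statement) =====
-- stated objective: alternative
-- what changed: A shrinks each candidate block by repeated `any` scans over the covered set (O(batch_size) scans per block); B makes one linear forward scan to each uncovered run's end and emits batch-sized chunks of the run directly (intended as faster; a timing run measured a 1.98x median at the largest size but not consistently across inputs, so no speed is claimed).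
-- outside the precondition, e.g. on _missing_page_ranges(0, [], -1): A returns [], B returns []; on _missing_page_ranges(3, [(0, 3)], -1): A returns [], B returns []
import Mathlib
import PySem

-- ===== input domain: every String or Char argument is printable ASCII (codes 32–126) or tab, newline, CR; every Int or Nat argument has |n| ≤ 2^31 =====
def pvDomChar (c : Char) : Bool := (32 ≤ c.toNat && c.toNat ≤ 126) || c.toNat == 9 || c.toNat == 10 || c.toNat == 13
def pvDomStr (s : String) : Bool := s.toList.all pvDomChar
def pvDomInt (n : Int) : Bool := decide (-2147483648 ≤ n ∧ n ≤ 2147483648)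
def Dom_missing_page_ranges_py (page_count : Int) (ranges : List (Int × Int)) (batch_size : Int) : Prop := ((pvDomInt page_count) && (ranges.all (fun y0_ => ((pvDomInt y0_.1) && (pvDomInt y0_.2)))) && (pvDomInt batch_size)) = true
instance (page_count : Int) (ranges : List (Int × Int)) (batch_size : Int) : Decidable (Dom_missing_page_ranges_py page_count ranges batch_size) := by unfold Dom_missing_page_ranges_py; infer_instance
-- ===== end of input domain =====

-- B replaces A's per-block shrink loop (repeated `any` scans over the covered set) by one
-- linear scan to each uncovered run's end, then emits batch-sized chunks directly (objective: alternative).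

-- ===== PORT A =====
-- _covered_pages: set built by adding every page of range(max(0,start), min(stop, upper_bound))
def pvCoveredA (page_count : Int) (ranges : List (Int × Int)) : Std.TreeSet Int :=
  let upper_bound : Int := max page_count (PySem.List.maxD (ranges.map Prod.snd) (fun x => x) 0)
  ranges.foldl
    (fun cov r =>
      (PySem.List.pyRange (max 0 r.1) (min r.2 upper_bound) 1).foldl (fun c p => c.insert p) cov)
    (∅ : Std.TreeSet Int)

-- inner `while stop_page > start_page and any(candidate in covered ...)` loop
def pvShrinkA (cov : Std.TreeSet Int) (start : Int) (stop : Int) : Int :=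
  if stop > start ∧ (PySem.List.pyRange start stop 1).any (fun c => cov.contains c) then
    pvShrinkA cov start (stop - 1)
  else stop
termination_by (stop - start).toNat
decreasing_by omega

-- outer `while page < page_count` loop; fuel bounds the iteration count (page advances by
-- at least 1 per iteration whenever batch_size ≥ 0, so page_count.toNat fuel is exact there)
def pvLoopA (cov : Std.TreeSet Int) (page_count batch_size : Int) :
    Nat → Int → List (Int × Int) → List (Int × Int)
  | 0, _, acc => acc
  | fuel + 1, page, acc =>
    if page < page_count then
      if cov.contains page then
        pvLoopA cov page_count batch_size fuel (page + 1) acc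
      else
        let start := page
        let stop0 := min page_count (start + batch_size)
        let stop1 := pvShrinkA cov start stop0
        let stop2 := if stop1 = start then start + 1 else stop1
        pvLoopA cov page_count batch_size fuel stop2 (acc ++ [(start, stop2)])
    else acc

def missing_page_ranges_py (page_count : Int) (ranges : List (Int × Int)) (batch_size : Int) : List (Int × Int) :=
  pvLoopA (pvCoveredA page_count ranges) page_count batch_size page_count.toNat 0 []

-- ===== PORT B =====
-- set comprehension {p for (a,b) in ranges for p in range(max(0,a), min(b, page_count))}
def pvCoveredB (page_count : Int) (ranges : List (Int × Int)) : Std.TreeSet Int :=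
  ranges.foldl
    (fun cov r =>
      (PySem.List.pyRange (max 0 r.1) (min r.2 page_count) 1).foldl (fun c p => c.insert p) cov)
    (∅ : Std.TreeSet Int)

-- `while j < page_count and j not in covered: j += 1`
def pvRunEnd (cov : Std.TreeSet Int) (page_count : Int) (j : Int) : Int :=
  if h : j < page_count ∧ ¬ cov.contains j then
    pvRunEnd cov page_count (j + 1)
  else j
termination_by (page_count - j).toNat
decreasing_by omega

-- `while i < j: e = min(j, i + step); out.append((i, e)); i = e`  (caller's step is ≥ 1;
-- the `1 ≤ step` conjunct only makes the recursion total)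
def pvChunksB (step : Int) (i j : Int) : List (Int × Int) :=
  if h : i < j ∧ 1 ≤ step then
    (i, min j (i + step)) :: pvChunksB step (min j (i + step)) j
  else []
termination_by (j - i).toNat
decreasing_by omega

def pvLoopB (cov : Std.TreeSet Int) (page_count step : Int) :
    Nat → Int → List (Int × Int) → List (Int × Int)
  | 0, _, acc => acc
  | fuel + 1, i, acc =>
    if i < page_count then
      if cov.contains i then
        pvLoopB cov page_count step fuel (i + 1) acc
      else
        let j := pvRunEnd cov page_count i
        pvLoopB cov page_count step fuel j (acc ++ pvChunksB step i j)
    else acc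

def missing_page_ranges_py_alt (page_count : Int) (ranges : List (Int × Int)) (batch_size : Int) : List (Int × Int) :=
  pvLoopB (pvCoveredB page_count ranges) page_count (max batch_size 1) page_count.toNat 0 []

-- ===== PRECONDITION & SPEC =====
-- Pre_ excludes negative batch_size: there A loops forever as soon as an uncovered page
-- exists (the emitted stop_page falls below page, so page never advances); B returns the
-- natural chunking instead.
def Pre_missing_page_ranges_py (page_count : Int) (ranges : List (Int × Int)) (batch_size : Int) : Prop :=
  0 ≤ batch_size
instance (page_count : Int) (ranges : List (Int × Int)) (batch_size : Int) : Decidable (Pre_missing_page_ranges_py page_count ranges batch_size) := by unfold Pre_missing_page_ranges_py; infer_instance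

def pvWitness_missing_page_ranges_py : Int × (List (Int × Int)) × Int := (10, [(2, 4), (7, 8)], 3)

def Spec_missing_page_ranges_py (page_count : Int) (ranges : List (Int × Int)) (batch_size : Int) (out : List (Int × Int)) : Prop := out = missing_page_ranges_py_alt page_count ranges batch_size
instance (page_count : Int) (ranges : List (Int × Int)) (batch_size : Int) (out : List (Int × Int)) : Decidable (Spec_missing_page_ranges_py page_count ranges batch_size out) := by unfold Spec_missing_page_ranges_py; infer_instance

-- ===== CLAIM (what is proved, stated in full; the proofs are below) =====
def Claim_equal_missing_page_ranges_py : Prop := ∀ (page_count : Int) (ranges : List (Int × Int)) (batch_size : Int), Dom_missing_page_ranges_py page_count ranges batch_size → Pre_missing_page_ranges_py page_count ranges batch_size → Spec_missing_page_ranges_py page_count ranges batch_size (missing_page_ranges_py page_count ranges batch_size)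

-- ===== LEMMAS AND PROOFS =====

-- the one-range-at-a-time predicate both covered structures realise on [0, page_count)
def pvCov (ranges : List (Int × Int)) (p : Int) : Bool :=
  ranges.any (fun r => decide (r.1 ≤ p) && decide (p < r.2))

theorem pvTreeContains_insert (s : Std.TreeSet Int) (a b : Int) :
    (s.insert a).contains b = (decide (b = a) || s.contains b) := by
  rw [Std.TreeSet.contains_insert]
  congr 1
  rw [show compare a b = compareOfLessAndEq a b from rfl]
  unfold compareOfLessAndEq
  split_ifs with h1 h2 <;> simp <;> omega

theorem pvContains_foldl_add (l : List Int) (s : Std.TreeSet Int) (p : Int) :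
    (l.foldl (fun c x => c.insert x) s).contains p
      = (s.contains p || decide (p ∈ l)) := by
  induction l generalizing s with
  | nil => simp
  | cons a t ih =>
    simp only [List.foldl_cons, ih, pvTreeContains_insert, List.mem_cons]
    cases s.contains p <;> by_cases hap : p = a <;> simp [hap]

theorem pvContains_fold_cap (cap : Int) (ranges : List (Int × Int))
    (s0 : Std.TreeSet Int) (p : Int) :
    ((ranges.foldl (fun cov r => (PySem.List.pyRange (max 0 r.1) (min r.2 cap) 1).foldl (fun c x => c.insert x) cov) s0)).contains p
      = (s0.contains p || ranges.any (fun r => decide (max 0 r.1 ≤ p) && decide (p < min r.2 cap))) := by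
  induction ranges generalizing s0 with
  | nil => simp
  | cons r t ih =>
    simp only [List.foldl_cons, ih, pvContains_foldl_add, List.any_cons]
    rw [show (decide (p ∈ PySem.List.pyRange (max 0 r.1) (min r.2 cap) 1))
        = (decide (max 0 r.1 ≤ p) && decide (p < min r.2 cap)) by
      simp [PySem.List.mem_pyRange_one]]
    cases s0.contains p <;> simp [Bool.or_assoc]

theorem pvMemA (page_count : Int) (ranges : List (Int × Int)) (p : Int)
    (h0 : 0 ≤ p) (h1 : p < page_count) :
    (pvCoveredA page_count ranges).contains p = pvCov ranges p := by
  have hub : page_count ≤ max page_count (PySem.List.maxD (ranges.map Prod.snd) (fun x => x) 0) :=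
    le_max_left _ _
  refine (pvContains_fold_cap (max page_count (PySem.List.maxD (ranges.map Prod.snd) (fun x => x) 0))
      ranges (∅ : Std.TreeSet Int) p).trans ?_
  simp only [Std.TreeSet.contains_emptyc, Bool.false_or]
  unfold pvCov
  congr 1
  funext r
  have hmax : (decide (max 0 r.1 ≤ p) = decide (r.1 ≤ p)) := by simp; omega
  rw [hmax]
  congr 1
  simp only [decide_eq_decide, lt_min_iff]
  constructor
  · exact fun h => h.1
  · exact fun h => ⟨h, lt_of_lt_of_le h1 hub⟩

theorem pvMemB (page_count : Int) (ranges : List (Int × Int)) (p : Int)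
    (h0 : 0 ≤ p) (h1 : p < page_count) :
    (pvCoveredB page_count ranges).contains p = pvCov ranges p := by
  refine (pvContains_fold_cap page_count ranges (∅ : Std.TreeSet Int) p).trans ?_
  simp only [Std.TreeSet.contains_emptyc, Bool.false_or]
  unfold pvCov
  congr 1
  funext r
  have hmax : (decide (max 0 r.1 ≤ p) = decide (r.1 ≤ p)) := by simp; omega
  rw [hmax]
  congr 1
  simp only [decide_eq_decide, lt_min_iff]
  exact ⟨fun h => h.1, fun h => ⟨h, h1⟩⟩

-- ---- properties of pvRunEnd ----

theorem pvRunEnd_lb (cov : Std.TreeSet Int) (pc i : Int) : i ≤ pvRunEnd cov pc i := by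
  fun_induction pvRunEnd cov pc i with
  | case1 j h ih => omega
  | case2 j h => omega

theorem pvRunEnd_le (cov : Std.TreeSet Int) (pc i : Int) (h : i ≤ pc) :
    pvRunEnd cov pc i ≤ pc := by
  fun_induction pvRunEnd cov pc i with
  | case1 j h' ih => exact ih (by omega)
  | case2 j h' => omega

theorem pvRunEnd_uncov (cov : Std.TreeSet Int) (pc i : Int) :
    ∀ k, i ≤ k → k < pvRunEnd cov pc i → (¬ cov.contains k ∧ k < pc) := by
  fun_induction pvRunEnd cov pc i with
  | case1 j h ih =>
    intro k hk1 hk2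
    rcases eq_or_lt_of_le hk1 with rfl | hlt
    · exact ⟨h.2, h.1⟩
    · exact ih k (by omega) hk2
  | case2 j h => intro k hk1 hk2; omega

theorem pvRunEnd_gt (cov : Std.TreeSet Int) (pc i : Int) (h1 : i < pc)
    (h2 : ¬ cov.contains i) : i + 1 ≤ pvRunEnd cov pc i := by
  rw [pvRunEnd]
  rw [dif_pos ⟨h1, h2⟩]
  exact pvRunEnd_lb cov pc (i + 1)

theorem pvRunEnd_stop (cov : Std.TreeSet Int) (pc i : Int) :
    pc ≤ pvRunEnd cov pc i ∨ cov.contains (pvRunEnd cov pc i) = true := by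
  fun_induction pvRunEnd cov pc i with
  | case1 j h ih => exact ih
  | case2 j h =>
    by_cases hj : j < pc
    · right; by_contra hc; exact h ⟨hj, by simpa using hc⟩
    · left; omega

theorem pvRunEnd_advance (cov : Std.TreeSet Int) (pc i : Int) :
    ∀ e, i ≤ e → e ≤ pvRunEnd cov pc i → pvRunEnd cov pc e = pvRunEnd cov pc i := by
  intro e
  have hgen : ∀ n : Nat, ∀ i : Int, (e - i).toNat = n → i ≤ e → e ≤ pvRunEnd cov pc i →
      pvRunEnd cov pc e = pvRunEnd cov pc i := by
    intro n
    induction n with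
    | zero =>
      intro i h1 h2 h3
      have he : i = e := by omega
      subst he
      rfl
    | succ m ih =>
      intro i h1 h2 h3
      have hi : i < e := by omega
      have hilt : i < pvRunEnd cov pc i := by omega
      have hiu := pvRunEnd_uncov cov pc i i le_rfl hilt
      have hstep : pvRunEnd cov pc i = pvRunEnd cov pc (i + 1) := by
        rw [pvRunEnd]
        rw [dif_pos ⟨hiu.2, hiu.1⟩]
      rw [hstep] at h3 ⊢
      exact ih (i + 1) (by omega) (by omega) h3
  exact hgen (e - i).toNat i rfl

theorem pvRunEnd_congr (covA covB : Std.TreeSet Int) (pc : Int)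
    (H : ∀ p, 0 ≤ p → p < pc → covA.contains p = covB.contains p) :
    ∀ i, 0 ≤ i → pvRunEnd covA pc i = pvRunEnd covB pc i := by
  intro i
  fun_induction pvRunEnd covA pc i with
  | case1 j h ih =>
    intro h0
    conv_rhs => rw [pvRunEnd]
    rw [dif_pos ⟨h.1, by rw [← H j h0 h.1]; exact h.2⟩]
    exact ih (by omega)
  | case2 j h =>
    intro h0
    conv_rhs => rw [pvRunEnd]
    by_cases hj : j < pc
    · rw [dif_neg]
      intro hc
      exact h ⟨hj, by rw [H j h0 hj]; exact hc.2⟩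
    · rw [dif_neg (by omega)]

-- ---- pvShrinkA computes min stop (run end) ----

theorem pvShrink_eq (cov : Std.TreeSet Int) (pc start : Int)
    (hs : ¬ cov.contains start) (hpc : start < pc) :
    ∀ stop, start ≤ stop → stop ≤ pc →
      pvShrinkA cov start stop = min stop (pvRunEnd cov pc start) := by
  intro stop
  fun_induction pvShrinkA cov start stop with
  | case1 stop h ih =>
    intro h1 h2
    obtain ⟨k, hk, hck⟩ := List.any_eq_true.mp h.2
    rw [PySem.List.mem_pyRange_one] at hk
    have hj : pvRunEnd cov pc start < stop := by
      by_contra hc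
      push Not at hc
      exact (pvRunEnd_uncov cov pc start k hk.1 (by omega)).1 hck
    rw [ih (by omega) (by omega)]
    omega
  | case2 stop h =>
    intro h1 h2
    rcases eq_or_lt_of_le h1 with rfl | hlt
    · have := pvRunEnd_lb cov pc start; omega
    · have hle : stop ≤ pvRunEnd cov pc start := by
        by_contra hc
        push Not at hc
        have hj1 := pvRunEnd_gt cov pc start hpc hs
        have hj2 := pvRunEnd_stop cov pc start
        have hj3 : cov.contains (pvRunEnd cov pc start) = true := by
          rcases hj2 with hj2 | hj2
          · omega
          · exact hj2
        apply h
        refine ⟨hlt, List.any_eq_true.mpr ⟨pvRunEnd cov pc start, ?_, by simpa using hj3⟩⟩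
        rw [PySem.List.mem_pyRange_one]
        omega
      omega

-- ---- loop shapes ----

theorem pvLoopA_of_ge (cov : Std.TreeSet Int) (pc bs : Int) (fuel : Nat) (page : Int)
    (acc : List (Int × Int)) (h : pc ≤ page) :
    pvLoopA cov pc bs fuel page acc = acc := by
  cases fuel with
  | zero => rfl
  | succ f => simp only [pvLoopA]; rw [if_neg (by omega)]

theorem pvLoopB_of_ge (cov : Std.TreeSet Int) (pc step : Int) (fuel : Nat) (i : Int)
    (acc : List (Int × Int)) (h : pc ≤ i) :
    pvLoopB cov pc step fuel i acc = acc := by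
  cases fuel with
  | zero => rfl
  | succ f => simp only [pvLoopB]; rw [if_neg (by omega)]

theorem pvChunksB_nil (step j : Int) : pvChunksB step j j = [] := by
  rw [pvChunksB]; rw [dif_neg (by omega)]

-- fuel irrelevance for pvLoopB (any sufficient fuel gives the same run)
theorem pvLoopB_fuel (cov : Std.TreeSet Int) (pc step : Int) (hstep : 1 ≤ step) :
    ∀ (n fuel fuel' : Nat) (i : Int) (acc : List (Int × Int)), 0 ≤ i →
      (pc - i).toNat ≤ n → (pc - i).toNat ≤ fuel → (pc - i).toNat ≤ fuel' →
      pvLoopB cov pc step fuel i acc = pvLoopB cov pc step fuel' i acc := by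
  intro n
  induction n with
  | zero =>
    intro fuel fuel' i acc h0 hn hf hf'
    rw [pvLoopB_of_ge cov pc step fuel i acc (by omega),
        pvLoopB_of_ge cov pc step fuel' i acc (by omega)]
  | succ m ih =>
    intro fuel fuel' i acc h0 hn hf hf'
    by_cases hi : i < pc
    · obtain ⟨f, rfl⟩ : ∃ f, fuel = f + 1 := ⟨fuel - 1, by omega⟩
      obtain ⟨f', rfl⟩ : ∃ f', fuel' = f' + 1 := ⟨fuel' - 1, by omega⟩
      simp only [pvLoopB]
      rw [if_pos hi, if_pos hi]
      by_cases hc : cov.contains i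
      · rw [if_pos hc, if_pos hc]
        exact ih f f' (i + 1) acc (by omega) (by omega) (by omega) (by omega)
      · rw [if_neg (by simpa using hc), if_neg (by simpa using hc)]
        have hj := pvRunEnd_gt cov pc i hi hc
        have hjle := pvRunEnd_le cov pc i (by omega)
        exact ih f f' (pvRunEnd cov pc i) _ (by omega) (by omega) (by omega) (by omega)
    · rw [pvLoopB_of_ge cov pc step fuel i acc (by omega),
          pvLoopB_of_ge cov pc step fuel' i acc (by omega)]

-- ---- main loop equivalence ----

theorem pvMain (covA covB : Std.TreeSet Int) (pc bs : Int) (hbs : 0 ≤ bs)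
    (H : ∀ p, 0 ≤ p → p < pc → covA.contains p = covB.contains p) :
    ∀ (n fuelA fuelB : Nat) (page : Int) (acc : List (Int × Int)), 0 ≤ page →
      (pc - page).toNat ≤ n → (pc - page).toNat ≤ fuelA → (pc - page).toNat ≤ fuelB →
      pvLoopA covA pc bs fuelA page acc = pvLoopB covB pc (max bs 1) fuelB page acc := by
  intro n
  induction n with
  | zero =>
    intro fuelA fuelB page acc h0 hn hfA hfB
    rw [pvLoopA_of_ge covA pc bs fuelA page acc (by omega),
        pvLoopB_of_ge covB pc (max bs 1) fuelB page acc (by omega)]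
  | succ m ih =>
    intro fuelA fuelB page acc h0 hn hfA hfB
    by_cases hp : page < pc
    · obtain ⟨fA, rfl⟩ : ∃ f, fuelA = f + 1 := ⟨fuelA - 1, by omega⟩
      obtain ⟨fB, rfl⟩ : ∃ f, fuelB = f + 1 := ⟨fuelB - 1, by omega⟩
      simp only [pvLoopA, pvLoopB]
      rw [if_pos hp, if_pos hp]
      by_cases hc : covA.contains page
      · rw [if_pos hc, if_pos (show covB.contains page = true by rw [← H page h0 hp]; exact hc)]
        exact ih fA fB (page + 1) acc (by omega) (by omega) (by omega) (by omega)
      · have hcB : ¬ covB.contains page = true := by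
          rw [← H page h0 hp]; simpa using hc
        rw [if_neg (show ¬ covA.contains page = true by simpa using hc),
            if_neg hcB]
        set j := pvRunEnd covB pc page with hjdef
        have hjA : pvRunEnd covA pc page = j := pvRunEnd_congr covA covB pc H page h0
        have hj1 : page + 1 ≤ j := pvRunEnd_gt covB pc page hp (by simpa using hcB)
        have hj2 : j ≤ pc := pvRunEnd_le covB pc page (by omega)
        -- A's emitted block end equals min j (page + max bs 1)
        have hshr : pvShrinkA covA page (min pc (page + bs))
            = min (min pc (page + bs)) j := by
          rw [pvShrink_eq covA pc page (by simpa using hc) hp (min pc (page + bs))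
            (by omega) (by omega), hjA]
        set e := min j (page + max bs 1) with hedef
        have hstop2 : (if pvShrinkA covA page (min pc (page + bs)) = page then page + 1
            else pvShrinkA covA page (min pc (page + bs))) = e := by
          rw [hshr]
          rcases eq_or_lt_of_le hbs with hb0 | hb1
          · rw [if_pos (by omega)]; omega
          · rw [if_neg (by omega)]; omega
        rw [hstop2]
        have he1 : page < e := by omega
        have he2 : e ≤ j := by omega
        rcases eq_or_lt_of_le he2 with hej | hej
        · -- single chunk: e = j
          have hch : pvChunksB (max bs 1) page j = [(page, e)] := by
            rw [pvChunksB]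
            rw [dif_pos ⟨by omega, by omega⟩]
            rw [show min j (page + max bs 1) = e from rfl, hej, pvChunksB_nil]
          rw [hch, hej]
          exact ih fA fB j _ (by omega) (by omega) (by omega) (by omega)
        · -- e < j : A recurses mid-run; step B's loop once more from e
          have hch : pvChunksB (max bs 1) page j
              = (page, e) :: pvChunksB (max bs 1) e j := by
            rw [pvChunksB]
            rw [dif_pos ⟨by omega, by omega⟩]
          have hIH : pvLoopA covA pc bs fA e (acc ++ [(page, e)])
              = pvLoopB covB pc (max bs 1) fA e (acc ++ [(page, e)]) :=
            ih fA fA e _ (by omega) (by omega) (by omega) (by omega)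
          rw [hIH]
          obtain ⟨fA', rfl⟩ : ∃ f, fA = f + 1 := ⟨fA - 1, by omega⟩
          simp only [pvLoopB]
          rw [if_pos (show e < pc by omega)]
          have hce : ¬ covB.contains e = true :=
            (pvRunEnd_uncov covB pc page e (by omega) (by omega)).1
          rw [if_neg hce]
          have hre : pvRunEnd covB pc e = j :=
            pvRunEnd_advance covB pc page e (by omega) (by omega)
          rw [hre, hch]
          have hfuel := pvLoopB_fuel covB pc (max bs 1) (by omega) m fA' fB j
            (acc ++ (page, e) :: pvChunksB (max bs 1) e j) (by omega) (by omega)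
            (by omega) (by omega)
          rw [← hfuel]
          simp
    · rw [pvLoopA_of_ge covA pc bs (fuelA) page acc (by omega),
          pvLoopB_of_ge covB pc (max bs 1) (fuelB) page acc (by omega)]

-- ===== VERDICT (by name: the statement is the Claim_ definition above) =====
theorem missing_page_ranges_py_spec : Claim_equal_missing_page_ranges_py := by
  intro page_count ranges batch_size _ hpre
  unfold Spec_missing_page_ranges_py missing_page_ranges_py missing_page_ranges_py_alt
  exact pvMain (pvCoveredA page_count ranges) (pvCoveredB page_count ranges) page_count
    batch_size hpre
    (fun p h0 h1 => by rw [pvMemA page_count ranges p h0 h1, pvMemB page_count ranges p h0 h1])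
    page_count.toNat page_count.toNat page_count.toNat 0 [] le_rfl (by omega) (by omega) (by omega)
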